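-- pv_equiv track=rewrite | github.com/chloeklin/dmpnn | scripts/python/make_wdmpnn_input.py | _labels_pairs
-- ===== SOURCE A (Python) =====
-- from typing import List, Tuple, Dict, Optional
--
-- def _labels_pairs(labels_A: List[int], labels_B: List[int]) -> List[Tuple[int,int]]:
--     """All pairs: self, within A, within B, and between (canonicalized)."""
--     pairs = []
--     # self
--     for k in labels_A + labels_B:
--         pairs.append((k, k))
--     # within A
--     la = sorted(labels_A)
--     for i in range(len(la)):
--         for j in range(i+1, len(la)):
--             pairs.append((la[i], la[j]))
--     # within B
--     lb = sorted(labels_B)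
--     for i in range(len(lb)):
--         for j in range(i+1, len(lb)):
--             pairs.append((lb[i], lb[j]))
--     # between
--     for i in labels_A:
--         for j in labels_B:
--             if i <= j:
--                 pairs.append((i, j))
--             else:
--                 pairs.append((j, i))
--     # dedupe & sort
--     pairs = sorted(set(pairs))
--     return pairs
-- ===== SOURCE B (Python) =====
-- def _labels_pairs(labels_A, labels_B):
--     """All canonical pairs (x, y) with x <= y over the distinct labels, sorted."""
--     uniq = sorted(set(labels_A + labels_B))
--     out = []
--     s = uniq
--     while s:
--         x = s[0]
--         for y in s:
--             out.append((x, y))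
--         s = s[1:]
--     return out
-- ===== Notes on version B (the rewrite author's own statement) =====
-- stated objective: faster
-- what changed: Instead of enumerating all O(n^2) within/between pairs and then dedupe-sorting that quadratic list, B dedupes and sorts the labels once and emits the canonical pairs of the m distinct labels directly in sorted order.
import Mathlib
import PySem

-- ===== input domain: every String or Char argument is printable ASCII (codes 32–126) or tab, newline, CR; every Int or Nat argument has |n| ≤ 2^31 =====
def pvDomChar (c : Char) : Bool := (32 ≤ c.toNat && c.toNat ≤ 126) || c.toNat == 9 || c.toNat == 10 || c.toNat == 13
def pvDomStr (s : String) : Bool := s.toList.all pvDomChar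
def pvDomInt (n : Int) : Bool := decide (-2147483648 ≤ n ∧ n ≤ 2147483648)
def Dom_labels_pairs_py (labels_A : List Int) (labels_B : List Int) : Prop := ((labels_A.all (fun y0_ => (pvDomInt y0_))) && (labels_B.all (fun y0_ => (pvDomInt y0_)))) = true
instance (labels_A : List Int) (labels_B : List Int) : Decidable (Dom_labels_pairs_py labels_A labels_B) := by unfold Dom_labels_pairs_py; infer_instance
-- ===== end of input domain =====

-- B replaces A's quadratic pair enumeration followed by dedupe-and-sort of the quadratic pair
-- list by a single dedupe-and-sort of the labels followed by emitting the canonical pairs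
-- directly in sorted order (objective: faster).

-- ===== PORT A =====
def labels_pairs_py (labels_A : List Int) (labels_B : List Int) : List (Int × Int) :=
  -- pairs = []; self-pairs
  let pairs1 := (labels_A ++ labels_B).foldl (fun acc k => acc ++ [(k, k)]) ([] : List (Int × Int))
  -- within A
  let la := PySem.List.sorted labels_A (fun x => x)
  let pairs2 := (PySem.List.pyRange 0 (la.length : Int) 1).foldl (fun acc i =>
      (PySem.List.pyRange (i + 1) (la.length : Int) 1).foldl (fun acc2 j =>
        acc2 ++ [(PySem.List.pyGetD la i 0, PySem.List.pyGetD la j 0)]) acc) pairs1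
  -- within B
  let lb := PySem.List.sorted labels_B (fun x => x)
  let pairs3 := (PySem.List.pyRange 0 (lb.length : Int) 1).foldl (fun acc i =>
      (PySem.List.pyRange (i + 1) (lb.length : Int) 1).foldl (fun acc2 j =>
        acc2 ++ [(PySem.List.pyGetD lb i 0, PySem.List.pyGetD lb j 0)]) acc) pairs2
  -- between (canonicalized)
  let pairs4 := labels_A.foldl (fun acc i =>
      labels_B.foldl (fun acc2 j =>
        acc2 ++ [if i ≤ j then (i, j) else (j, i)]) acc) pairs3
  -- dedupe & sort (tuples compare lexicographically)
  PySem.List.sorted2 (PySem.Set.ofList pairs4) Prod.fst Prod.snd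

-- ===== PORT B =====
-- Source B's while loop: append all (head, y) for y in the current suffix, then move to the tail
def pairsLoop : List Int → List (Int × Int) → List (Int × Int)
  | [], out => out
  | x :: xs, out => pairsLoop xs (out ++ ((x :: xs).map (fun y => (x, y))))

def labels_pairs_py_alt (labels_A : List Int) (labels_B : List Int) : List (Int × Int) :=
  pairsLoop (PySem.List.sorted (PySem.Set.ofList (labels_A ++ labels_B)) (fun x => x)) []

-- ===== PRECONDITION & SPEC =====
def Spec_labels_pairs_py (labels_A : List Int) (labels_B : List Int) (out : List (Int × Int)) : Prop := out = labels_pairs_py_alt labels_A labels_B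
instance (labels_A : List Int) (labels_B : List Int) (out : List (Int × Int)) : Decidable (Spec_labels_pairs_py labels_A labels_B out) := by unfold Spec_labels_pairs_py; infer_instance

-- ===== CLAIM (what is proved, stated in full; the proofs are below) =====
def Claim_equal_labels_pairs_py : Prop := ∀ (labels_A : List Int) (labels_B : List Int), Dom_labels_pairs_py labels_A labels_B → Spec_labels_pairs_py labels_A labels_B (labels_pairs_py labels_A labels_B)

-- ===== LEMMAS AND PROOFS =====

-- non-accumulator form of B's loop, used only in the proofs
def pairsFrom : List Int → List (Int × Int)
  | [] => []
  | x :: xs => ((x :: xs).map (fun y => (x, y))) ++ pairsFrom xs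

theorem pairsLoop_eq_append (s : List Int) : ∀ out, pairsLoop s out = out ++ pairsFrom s := by
  induction s with
  | nil => intro out; simp [pairsLoop, pairsFrom]
  | cons a t ih => intro out; rw [pairsLoop, pairsFrom, ih, List.append_assoc]

-- Python's tuple comparison: sorted2 with fst/snd keys is sorted with the lexicographic key
theorem sorted2_eq_sorted_lex (xs : List (Int × Int)) :
    PySem.List.sorted2 xs Prod.fst Prod.snd = PySem.List.sorted xs (fun p => (toLex p : Lex (Int × Int))) := by
  rw [PySem.List.sorted_eq_foldl_insertBy]
  simp only [PySem.List.sorted2, if_neg (by decide : ¬ (false = true))]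
  congr 1
  funext acc x
  congr 1
  funext a b
  rw [Bool.eq_iff_iff]
  simp only [Bool.or_eq_true, Bool.and_eq_true, Bool.not_eq_true', decide_eq_true_eq,
    decide_eq_false_iff_not, Prod.Lex.lt_iff, ofLex_toLex]
  omega

theorem fst_mem_of_mem_pairsFrom (p : Int × Int) : ∀ (s : List Int), p ∈ pairsFrom s → p.1 ∈ s := by
  intro s
  induction s with
  | nil => simp [pairsFrom]
  | cons a t ih =>
    intro hp
    rcases List.mem_append.mp hp with h | h
    · rcases List.mem_map.mp h with ⟨v, _, rfl⟩; exact List.mem_cons_self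
    · exact List.mem_cons_of_mem _ (ih h)

theorem mem_pairsFrom (s : List Int) (p : Int × Int) (hs : s.Pairwise (· < ·)) :
    p ∈ pairsFrom s ↔ p.1 ∈ s ∧ p.2 ∈ s ∧ p.1 ≤ p.2 := by
  obtain ⟨x, y⟩ := p
  induction s with
  | nil => simp [pairsFrom]
  | cons a t ih =>
    rcases List.pairwise_cons.mp hs with ⟨ha, ht⟩
    simp only [pairsFrom, List.mem_append, List.mem_map, List.mem_cons, ih ht, Prod.mk.injEq]
    constructor
    · rintro (⟨v, hv, rfl, rfl⟩ | ⟨h1, h2, h3⟩)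
      · rcases hv with rfl | hv
        · exact ⟨Or.inl rfl, Or.inl rfl, le_refl _⟩
        · exact ⟨Or.inl rfl, Or.inr hv, le_of_lt (ha v hv)⟩
      · exact ⟨Or.inr h1, Or.inr h2, h3⟩
    · rintro ⟨rfl | h1, h2 | h2, h3⟩
      · exact Or.inl ⟨y, Or.inl h2, rfl, rfl⟩
      · exact Or.inl ⟨y, Or.inr h2, rfl, rfl⟩
      · exact absurd h3 (not_le.mpr (h2 ▸ ha x h1))
      · exact Or.inr ⟨h1, h2, h3⟩

theorem pairsFrom_pairwise (s : List Int) (hs : s.Pairwise (· < ·)) :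
    (pairsFrom s).Pairwise (fun a b => (toLex a : Lex (Int × Int)) < toLex b) := by
  induction s with
  | nil => simp [pairsFrom]
  | cons a t ih =>
    rcases List.pairwise_cons.mp hs with ⟨ha, ht⟩
    simp only [pairsFrom]
    rw [List.pairwise_append]
    refine ⟨?_, ih ht, ?_⟩
    · rw [List.pairwise_map]
      refine List.Pairwise.imp ?_ hs
      intro x y hxy
      rw [Prod.Lex.lt_iff]
      exact Or.inr ⟨rfl, hxy⟩
    · intro x hx y hy
      rcases List.mem_map.mp hx with ⟨u, _, rfl⟩
      rw [Prod.Lex.lt_iff]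
      exact Or.inl (ha _ (fst_mem_of_mem_pairsFrom y t hy))

theorem within_sound (xs : List Int) (i j : Int) (h0 : 0 ≤ i) (hij : i + 1 ≤ j)
    (hj : j < ((PySem.List.sorted xs fun x => x).length : Int)) :
    PySem.List.pyGetD (PySem.List.sorted xs fun x => x) i 0 ∈ xs ∧
    PySem.List.pyGetD (PySem.List.sorted xs fun x => x) j 0 ∈ xs ∧
    PySem.List.pyGetD (PySem.List.sorted xs fun x => x) i 0 ≤ PySem.List.pyGetD (PySem.List.sorted xs fun x => x) j 0 := by
  have hi : i < ((PySem.List.sorted xs fun x => x).length : Int) := by omega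
  rw [PySem.List.pyGetD_eq_getElem (PySem.List.sorted xs fun x => x) 0 h0 hi,
      PySem.List.pyGetD_eq_getElem (PySem.List.sorted xs fun x => x) 0 (by omega : (0:Int) ≤ j) hj]
  refine ⟨?_, ?_, ?_⟩
  · exact (PySem.List.mem_sorted xs _ false _).mp (List.getElem_mem _)
  · exact (PySem.List.mem_sorted xs _ false _).mp (List.getElem_mem _)
  · exact PySem.List.sorted_id_getElem_mono xs (by omega) (by omega)

theorem within_exists (xs : List Int) (x y : Int) (hx : x ∈ xs) (hy : y ∈ xs) (hxy : x < y) :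
    ∃ i : Int, (0 ≤ i ∧ i < ((PySem.List.sorted xs fun x => x).length : Int)) ∧
      ∃ j : Int, (i + 1 ≤ j ∧ j < ((PySem.List.sorted xs fun x => x).length : Int)) ∧
        x = PySem.List.pyGetD (PySem.List.sorted xs fun x => x) i 0 ∧
        y = PySem.List.pyGetD (PySem.List.sorted xs fun x => x) j 0 := by
  obtain ⟨a, ha, rfl⟩ := List.mem_iff_getElem.mp ((PySem.List.mem_sorted xs (fun x => x) false x).mpr hx)
  obtain ⟨b, hb, rfl⟩ := List.mem_iff_getElem.mp ((PySem.List.mem_sorted xs (fun x => x) false y).mpr hy)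
  have hab : a < b := by
    by_contra h
    exact absurd (PySem.List.sorted_id_getElem_mono xs (by omega : b ≤ a) ha) (not_le.mpr hxy)
  refine ⟨(a : Int), ⟨by omega, by omega⟩, (b : Int), ⟨by omega, by omega⟩, ?_, ?_⟩
  · simp [PySem.List.pyGetD_natCast, List.getElem?_eq_getElem ha]
  · simp [PySem.List.pyGetD_natCast, List.getElem?_eq_getElem hb]

theorem mem_pairs4 (labels_A labels_B : List Int) (p : Int × Int) :
    p ∈ (labels_A.foldl (fun acc i =>
      labels_B.foldl (fun acc2 j =>
        acc2 ++ [if i ≤ j then (i, j) else (j, i)]) acc)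
      ((PySem.List.pyRange 0 ((PySem.List.sorted labels_B (fun x => x)).length : Int) 1).foldl (fun acc i =>
        (PySem.List.pyRange (i + 1) ((PySem.List.sorted labels_B (fun x => x)).length : Int) 1).foldl (fun acc2 j =>
          acc2 ++ [(PySem.List.pyGetD (PySem.List.sorted labels_B (fun x => x)) i 0, PySem.List.pyGetD (PySem.List.sorted labels_B (fun x => x)) j 0)]) acc)
        ((PySem.List.pyRange 0 ((PySem.List.sorted labels_A (fun x => x)).length : Int) 1).foldl (fun acc i =>
          (PySem.List.pyRange (i + 1) ((PySem.List.sorted labels_A (fun x => x)).length : Int) 1).foldl (fun acc2 j =>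
            acc2 ++ [(PySem.List.pyGetD (PySem.List.sorted labels_A (fun x => x)) i 0, PySem.List.pyGetD (PySem.List.sorted labels_A (fun x => x)) j 0)]) acc)
          ((labels_A ++ labels_B).foldl (fun acc k => acc ++ [(k, k)]) ([] : List (Int × Int)))))) ↔
    p.1 ≤ p.2 ∧ p.1 ∈ labels_A ++ labels_B ∧ p.2 ∈ labels_A ++ labels_B := by
  obtain ⟨x, y⟩ := p
  simp only [PySem.List.foldl_append_eq_flatMap, List.nil_append, List.mem_append,
    List.mem_flatMap, List.mem_singleton, PySem.List.mem_pyRange_one]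
  constructor
  · rintro (((⟨k, hk, hp⟩ | ⟨i, ⟨hi0, hin⟩, j, ⟨hij, hjn⟩, hp⟩) | ⟨i, ⟨hi0, hin⟩, j, ⟨hij, hjn⟩, hp⟩) |
      ⟨i, hi, j, hj, hp⟩)
    · rw [Prod.mk.injEq] at hp
      obtain ⟨rfl, rfl⟩ := hp
      exact ⟨le_refl _, hk, hk⟩
    · rw [Prod.mk.injEq] at hp
      obtain ⟨rfl, rfl⟩ := hp
      obtain ⟨h1, h2, h3⟩ := within_sound labels_A i j hi0 hij hjn
      exact ⟨h3, Or.inl h1, Or.inl h2⟩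
    · rw [Prod.mk.injEq] at hp
      obtain ⟨rfl, rfl⟩ := hp
      obtain ⟨h1, h2, h3⟩ := within_sound labels_B i j hi0 hij hjn
      exact ⟨h3, Or.inr h1, Or.inr h2⟩
    · split_ifs at hp with h
      · rw [Prod.mk.injEq] at hp
        obtain ⟨rfl, rfl⟩ := hp
        exact ⟨h, Or.inl hi, Or.inr hj⟩
      · rw [Prod.mk.injEq] at hp
        obtain ⟨rfl, rfl⟩ := hp
        exact ⟨by omega, Or.inr hj, Or.inl hi⟩
  · rintro ⟨hxy, hx, hy⟩
    rcases eq_or_lt_of_le hxy with rfl | hlt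
    · refine Or.inl (Or.inl (Or.inl ⟨x, ?_, rfl⟩))
      exact hx
    · rcases hx with hxA | hxB
      · rcases hy with hyA | hyB
        · obtain ⟨i, hi, j, hj, h1, h2⟩ := within_exists labels_A x y hxA hyA hlt
          exact Or.inl (Or.inl (Or.inr ⟨i, hi, j, hj, by rw [Prod.mk.injEq]; exact ⟨h1, h2⟩⟩))
        · exact Or.inr ⟨x, hxA, y, hyB, by rw [if_pos hxy]⟩
      · rcases hy with hyA | hyB
        · exact Or.inr ⟨y, hyA, x, hxB, by rw [if_neg (by omega)]⟩
        · obtain ⟨i, hi, j, hj, h1, h2⟩ := within_exists labels_B x y hxB hyB hlt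
          exact Or.inl (Or.inr ⟨i, hi, j, hj, by rw [Prod.mk.injEq]; exact ⟨h1, h2⟩⟩)

theorem pairsFrom_nodup (s : List Int) (hs : s.Pairwise (· < ·)) : (pairsFrom s).Nodup := by
  refine (pairsFrom_pairwise s hs).imp ?_
  intro a b hlt heq
  rw [heq] at hlt
  exact lt_irrefl _ hlt

-- ===== VERDICT (by name: the statement is the Claim_ definition above) =====
theorem labels_pairs_py_spec : Claim_equal_labels_pairs_py := by
  intro labels_A labels_B _
  unfold Spec_labels_pairs_py labels_pairs_py labels_pairs_py_alt
  dsimp only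
  rw [sorted2_eq_sorted_lex, pairsLoop_eq_append, List.nil_append]
  have hs : (PySem.List.sorted (PySem.Set.ofList (labels_A ++ labels_B)) (fun x => x)).Pairwise (· < ·) :=
    PySem.List.sorted_ofList_pairwise_lt _
  apply PySem.List.sorted_eq_of_perm_of_pairwise_lt
  · refine (List.perm_ext_iff_of_nodup (pairsFrom_nodup _ hs) (PySem.Set.nodup_ofList _)).mpr ?_
    intro p
    rw [mem_pairsFrom _ p hs, PySem.Set.mem_ofList, mem_pairs4]
    simp only [PySem.List.mem_sorted, PySem.Set.mem_ofList]
    tauto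
  · exact pairsFrom_pairwise _ hs
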